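-- pv_equiv track=rewrite | github.com/abhishekir/CodingBat_Solutions | src/String_2.py | starOut
-- ===== SOURCE A (Python) =====
-- def starOut(str):
--     if not str:
--         return str
--     else:
--         res = ""
--         i = 0
--         while i < len(str):
--             if (i > 0 and str[i-1] == "*") or str[i] == "*" or (i+1 < len(str) and str[i+1] == "*"):
--                 i += 1
--             else:
--                 res += str[i]
--                 i += 1
--         return res
-- ===== SOURCE B (Python) =====
-- def starOut(str):
--     if not str:
--         return str
--     remove = set()
--     for i, c in enumerate(str):
--         if c == '*':
--             remove.update((i - 1, i, i + 1))
--     return ''.join(c for i, c in enumerate(str) if i not in remove)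
-- ===== Notes on version B (the rewrite author's own statement) =====
-- stated objective: faster
-- what changed: Replaces A's single while-loop with inline neighbor checks and quadratic string concatenation by a two-pass collect-then-filter: first build a set of indices to delete (i-1, i, i+1 for every '*'), then ''.join the characters whose index is not in the set.
import Mathlib
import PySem

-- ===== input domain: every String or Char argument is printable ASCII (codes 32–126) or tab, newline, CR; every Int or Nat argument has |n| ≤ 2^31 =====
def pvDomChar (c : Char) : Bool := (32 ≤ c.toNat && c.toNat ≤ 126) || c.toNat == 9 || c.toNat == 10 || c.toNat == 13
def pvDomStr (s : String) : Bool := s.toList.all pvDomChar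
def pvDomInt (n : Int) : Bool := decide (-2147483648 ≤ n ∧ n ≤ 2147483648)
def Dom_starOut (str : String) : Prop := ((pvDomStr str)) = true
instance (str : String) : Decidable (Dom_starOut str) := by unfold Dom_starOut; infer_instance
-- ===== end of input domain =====

-- B replaces A's single pass with inline neighbour checks by a collect-then-filter
-- decomposition: a set of deleted indices is built first, then the string is filtered.
-- (both A and B are pure; equivalence of return values is proved for all inputs)

-- ===== PORT A =====
-- A's while-loop: fuel = remaining iterations (len - i); every str[..] access is
-- guarded in range by the surrounding conditions, so List.getD is exact here.
def starOutLoop (cs : List Char) (fuel i : Nat) (res : List Char) : List Char :=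
  match fuel with
  | 0 => res
  | fuel + 1 =>
    if i < cs.length then
      if (decide (0 < i) && decide (cs.getD (i-1) ' ' = '*'))
          || decide (cs.getD i ' ' = '*')
          || (decide (i+1 < cs.length) && decide (cs.getD (i+1) ' ' = '*')) then
        starOutLoop cs fuel (i+1) res
      else
        starOutLoop cs fuel (i+1) (res ++ [cs.getD i ' '])
    else res

def starOut (str : String) : String :=
  if str = "" then str
  else String.ofList (starOutLoop str.toList str.toList.length 0 [])

-- ===== PORT B =====
-- first pass of B: the set of indices marked for deletion
def removeSet (cs : List Char) : PySem.Set Int :=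
  (PySem.List.enumerate cs 0).foldl
    (fun acc p => if p.2 = '*' then PySem.Set.update acc [p.1 - 1, p.1, p.1 + 1] else acc)
    PySem.Set.empty

def starOut_alt (str : String) : String :=
  if str = "" then str
  else
    String.ofList (((PySem.List.enumerate str.toList 0).filter
      (fun p => !((removeSet str.toList).contains p.1))).map (fun p => p.2))

-- ===== PRECONDITION & SPEC =====
def Spec_starOut (str : String) (out : String) : Prop := out = starOut_alt str
instance (str : String) (out : String) : Decidable (Spec_starOut str out) := by unfold Spec_starOut; infer_instance

-- ===== CLAIM (what is proved, stated in full; the proofs are below) =====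
def Claim_equal_starOut : Prop := ∀ (str : String), Dom_starOut str → Spec_starOut str (starOut str)

-- ===== LEMMAS AND PROOFS =====

-- A's keep-condition for index k, as a Bool
def keepA (cs : List Char) (k : Nat) : Bool :=
  !((decide (0 < k) && decide (cs.getD (k-1) ' ' = '*'))
      || decide (cs.getD k ' ' = '*')
      || (decide (k+1 < cs.length) && decide (cs.getD (k+1) ' ' = '*')))

lemma keepA_false_iff (cs : List Char) (k : Nat) :
    keepA cs k = false ↔
      ((0 < k ∧ cs.getD (k-1) ' ' = '*') ∨ cs.getD k ' ' = '*'
        ∨ (k+1 < cs.length ∧ cs.getD (k+1) ' ' = '*')) := by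
  unfold keepA; simp [Nat.pos_iff_ne_zero]; tauto

lemma starOutLoop_eq (cs : List Char) :
    ∀ (n i : Nat) (res : List Char), n = cs.length - i →
      starOutLoop cs n i res =
        res ++ ((List.range' i n).filter (keepA cs)).map (fun j => cs.getD j ' ') := by
  intro n
  induction n with
  | zero => intro i res _; simp [starOutLoop]
  | succ n ih =>
    intro i res h
    have hi : i < cs.length := by omega
    have hn : n = cs.length - (i+1) := by omega
    rw [List.range'_succ]
    by_cases hk : keepA cs i = true
    · have hc : ((decide (0 < i) && decide (cs.getD (i-1) ' ' = '*'))
          || decide (cs.getD i ' ' = '*')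
          || (decide (i+1 < cs.length) && decide (cs.getD (i+1) ' ' = '*'))) = false := by
        unfold keepA at hk; rwa [Bool.not_eq_true'] at hk
      simp only [starOutLoop, if_pos hi, hc, Bool.false_eq_true, ite_false]
      rw [ih (i+1) (res ++ [cs.getD i ' ']) hn]
      simp [hk]
    · have hk' : keepA cs i = false := by
        revert hk; cases keepA cs i <;> simp
      have hc : ((decide (0 < i) && decide (cs.getD (i-1) ' ' = '*'))
          || decide (cs.getD i ' ' = '*')
          || (decide (i+1 < cs.length) && decide (cs.getD (i+1) ' ' = '*'))) = true := by
        unfold keepA at hk'; rwa [Bool.not_eq_false'] at hk'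
      simp only [starOutLoop, if_pos hi, hc, ite_true]
      rw [ih (i+1) res hn]
      simp [hk']

lemma mem_foldl_removeStep (l : List (Int × Char)) (s : PySem.Set Int) (y : Int) :
    y ∈ l.foldl
        (fun acc p => if p.2 = '*' then PySem.Set.update acc [p.1 - 1, p.1, p.1 + 1] else acc) s ↔
      y ∈ s ∨ ∃ p ∈ l, p.2 = '*' ∧ (y = p.1 - 1 ∨ y = p.1 ∨ y = p.1 + 1) := by
  induction l generalizing s with
  | nil => simp
  | cons p l ih =>
    simp only [List.foldl_cons]
    by_cases hp : p.2 = '*'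
    · rw [ih]
      simp only [hp, ite_true, PySem.Set.mem_update, List.mem_cons]
      constructor
      · rintro ((hy | hy) | ⟨q, hq, hq2, hq3⟩)
        · exact Or.inl hy
        · refine Or.inr ⟨p, Or.inl rfl, hp, by simpa using hy⟩
        · exact Or.inr ⟨q, Or.inr hq, hq2, hq3⟩
      · rintro (hy | ⟨q, hq | hq, hq2, hq3⟩)
        · exact Or.inl (Or.inl hy)
        · subst hq; exact Or.inl (Or.inr (by simpa using hq3))
        · exact Or.inr ⟨q, hq, hq2, hq3⟩
    · rw [ih]
      simp [hp]
  
lemma mem_removeSet (cs : List Char) (y : Int) :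
    y ∈ removeSet cs ↔
      ∃ (j : Nat), ∃ (h : j < cs.length), cs[j] = '*' ∧
        (y = (j : Int) - 1 ∨ y = (j : Int) ∨ y = (j : Int) + 1) := by
  unfold removeSet
  rw [mem_foldl_removeStep]
  simp only [PySem.Set.empty, List.not_mem_nil, false_or]
  constructor
  · rintro ⟨p, hp, hstar, hy⟩
    rw [PySem.List.mem_enumerate_iff] at hp
    obtain ⟨k, hk, rfl⟩ := hp
    exact ⟨k, hk, by simpa using hstar, by simpa using hy⟩
  · rintro ⟨j, hj, hstar, hy⟩
    refine ⟨((j : Int), cs[j]), ?_, hstar, hy⟩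
    rw [PySem.List.mem_enumerate_iff]
    exact ⟨j, hj, by simp⟩

lemma removeSet_mem_iff (cs : List Char) (k : Nat) (hk : k < cs.length) :
    (k : Int) ∈ removeSet cs ↔
      ((0 < k ∧ cs.getD (k-1) ' ' = '*') ∨ cs.getD k ' ' = '*'
        ∨ (k+1 < cs.length ∧ cs.getD (k+1) ' ' = '*')) := by
  rw [mem_removeSet]
  constructor
  · rintro ⟨j, hj, hstar, hy | hy | hy⟩
    · right; right
      have hjk : j = k + 1 := by omega
      subst hjk
      exact ⟨hj, by rw [List.getD_eq_getElem cs ' ' hj]; exact hstar⟩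
    · right; left
      have hjk : j = k := by omega
      subst hjk
      rw [List.getD_eq_getElem cs ' ' hj]; exact hstar
    · left
      have h0 : 0 < k := by omega
      refine ⟨h0, ?_⟩
      have hkj : k - 1 = j := by omega
      rw [hkj, List.getD_eq_getElem cs ' ' hj]; exact hstar
  · rintro (⟨h0, hget⟩ | hget | ⟨h1, hget⟩)
    · refine ⟨k-1, by omega, ?_, by right; right; omega⟩
      rw [← List.getD_eq_getElem cs ' ' (by omega : k-1 < cs.length)]; exact hget
    · refine ⟨k, hk, ?_, by right; left; rfl⟩
      rw [← List.getD_eq_getElem cs ' ' hk]; exact hget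
    · refine ⟨k+1, h1, ?_, by left; omega⟩
      rw [← List.getD_eq_getElem cs ' ' h1]; exact hget

lemma not_mem_removeSet_iff_keepA (cs : List Char) (k : Nat) (hk : k < cs.length) :
    (!((removeSet cs).contains (k : Int))) = keepA cs k := by
  have hcont : ((removeSet cs).contains (k : Int) = false) ↔ ¬((k : Int) ∈ removeSet cs) := by
    simp
  rw [Bool.eq_iff_iff, Bool.not_eq_true', hcont, removeSet_mem_iff cs k hk, ← keepA_false_iff]
  simp

lemma alt_list_eq (cs : List Char) :
    ((PySem.List.enumerate cs 0).filter (fun p => !((removeSet cs).contains p.1))).map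
        (fun p => p.2) =
      ((List.range' 0 cs.length).filter (keepA cs)).map (fun j => cs.getD j ' ') := by
  rw [PySem.List.enumerate_eq_map_pyRange (d := ' ')]
  simp only [PySem.List.len_eq]
  rw [PySem.List.pyRange_zero_nat]
  rw [List.map_map, List.filter_map, List.map_map, ← List.range_eq_range']
  rw [List.filter_congr (q := fun k => keepA cs k)
    (by intro k hk
        simp only [List.mem_range] at hk
        simp only [Function.comp_apply]
        exact not_mem_removeSet_iff_keepA cs k hk)]
  apply List.map_congr_left
  intro k hk
  simp only [List.mem_filter, List.mem_range] at hk
  simp only [Function.comp_apply]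
  rw [PySem.List.pyGetD_natCast]

-- ===== VERDICT (by name: the statement is the Claim_ definition above) =====
theorem starOut_spec : Claim_equal_starOut := by
  intro str _
  unfold Spec_starOut starOut starOut_alt
  by_cases h : str = ""
  · simp [h]
  · simp only [h, ite_false]
    congr 1
    rw [starOutLoop_eq str.toList str.toList.length 0 [] (by omega), alt_list_eq]
    simp
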